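-- pv_equiv track=rewrite | github.com/jam-lock/mars-20-dashboard | backend/scraper/utils.py | safe_insert
-- ===== SOURCE A (Python) =====
-- def safe_insert(d, k1, k2, k3, l):
--     try:
--         d[k1][k2][k3] = l
--     except KeyError:
--         try:
--             d[k1][k2] = {}
--             safe_insert(d, k1, k2, k3, l)
--         except KeyError:
--             d[k1] = {}
--             safe_insert(d, k1, k2, k3, l)
--     return d
-- ===== SOURCE B (Python) =====
-- def safe_insert(d, k1, k2, k3, l):
--     d.setdefault(k1, {}).setdefault(k2, {})[k3] = l
--     return d
-- ===== Notes on version B (the rewrite author's own statement) =====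
-- stated objective: idiomatic
-- what changed: Replaced the exception-driven recursive retry (try/except KeyError + self-recursion) by a single non-recursive setdefault descent that creates each missing level on the way down.
import Mathlib
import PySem

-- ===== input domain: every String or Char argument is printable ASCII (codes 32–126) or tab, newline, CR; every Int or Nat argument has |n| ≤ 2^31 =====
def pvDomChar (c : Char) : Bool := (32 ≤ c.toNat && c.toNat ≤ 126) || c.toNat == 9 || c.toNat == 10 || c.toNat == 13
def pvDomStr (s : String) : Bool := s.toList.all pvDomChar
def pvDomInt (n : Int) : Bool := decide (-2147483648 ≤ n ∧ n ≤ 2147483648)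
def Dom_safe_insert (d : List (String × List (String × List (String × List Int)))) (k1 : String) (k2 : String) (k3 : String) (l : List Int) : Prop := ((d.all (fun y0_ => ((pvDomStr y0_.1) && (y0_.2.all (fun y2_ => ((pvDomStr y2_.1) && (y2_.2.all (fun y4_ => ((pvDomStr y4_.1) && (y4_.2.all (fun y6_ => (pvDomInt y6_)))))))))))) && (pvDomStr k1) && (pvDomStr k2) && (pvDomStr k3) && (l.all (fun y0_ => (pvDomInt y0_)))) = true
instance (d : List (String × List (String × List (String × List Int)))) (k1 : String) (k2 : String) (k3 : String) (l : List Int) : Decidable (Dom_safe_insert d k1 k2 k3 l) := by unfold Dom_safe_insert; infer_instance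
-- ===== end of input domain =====

-- B replaces A's exception-driven recursive retry (try/except KeyError + self-recursion)
-- by a single non-recursive setdefault descent; both mutate d in place in Python and
-- return d itself, so the proved equivalence of return values covers the mutation too.

-- Dict-as-association-list primitives shared by both ports (the PySem.Dict model applied
-- to the raw item lists of the signature): first-match lookup, overwrite-in-place insert,
-- Python's dict.setdefault.
def aget {β : Type} (d : List (String × β)) (k : String) : Option β :=
  (PySem.Dict.mk d).get? k
def aset {β : Type} (d : List (String × β)) (k : String) (v : β) : List (String × β) :=
  ((PySem.Dict.mk d).insert k v).items
def asetdefault {β : Type} (d : List (String × β)) (k : String) (v : β) : List (String × β) :=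
  ((PySem.Dict.mk d).setdefault k v).items
-- needed by name in port A's termination argument, so it stays above the ports
theorem aget_aset_self {β : Type} (d : List (String × β)) (k : String) (v : β) :
    aget (aset d k v) k = some v := by
  show ((PySem.Dict.mk d).insert k v).get? k = some v
  exact PySem.Dict.get?_insert_self _ _ _

-- ===== PORT A =====
-- A retries via self-recursion after creating a missing level (KeyError ⟷ aget = none):
-- try d[k1][k2][k3] = l; on KeyError try d[k1][k2] = {} and recurse; on KeyError there,
-- d[k1] = {} and recurse.
def safe_insert (d : List (String × List (String × List (String × List Int)))) (k1 : String) (k2 : String) (k3 : String) (l : List Int) : List (String × List (String × List (String × List Int))) :=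
  match h1 : aget d k1 with
  | some m1 =>
    match h2 : aget m1 k2 with
    | some m2 =>
      aset d k1 (aset m1 k2 (aset m2 k3 l))
    | none =>
      safe_insert (aset d k1 (aset m1 k2 [])) k1 k2 k3 l
  | none =>
    safe_insert (aset d k1 []) k1 k2 k3 l
termination_by (match aget d k1 with
  | none => 2
  | some m1 => match aget m1 k2 with | none => 1 | some _ => (0 : Nat))
decreasing_by
  · have e1 := aget_aset_self d k1 (aset m1 k2 ([] : List (String × List Int)))
    have e2 := aget_aset_self m1 k2 ([] : List (String × List Int))
    simp only [aget] at e1 e2 h1 h2 ⊢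
    simp [e1, e2, h1, h2]
  · have e1 := aget_aset_self d k1 ([] : List (String × List (String × List Int)))
    have e3 : aget ([] : List (String × List (String × List Int))) k2 = none := rfl
    simp only [aget] at e1 e3 h1 ⊢
    simp [e1, e3, h1]

-- ===== PORT B =====
-- Source B: d.setdefault(k1, {}).setdefault(k2, {})[k3] = l; return d
def safe_insert_alt (d : List (String × List (String × List (String × List Int)))) (k1 : String) (k2 : String) (k3 : String) (l : List Int) : List (String × List (String × List (String × List Int))) :=
  let d1 := asetdefault d k1 []
  let m1 := (aget d1 k1).getD []
  let m1' := asetdefault m1 k2 []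
  let m2 := (aget m1' k2).getD []
  aset d1 k1 (aset m1' k2 (aset m2 k3 l))


-- ===== PRECONDITION & SPEC =====
def Spec_safe_insert (d : List (String × List (String × List (String × List Int)))) (k1 : String) (k2 : String) (k3 : String) (l : List Int) (out : List (String × List (String × List (String × List Int)))) : Prop := out = safe_insert_alt d k1 k2 k3 l
instance (d : List (String × List (String × List (String × List Int)))) (k1 : String) (k2 : String) (k3 : String) (l : List Int) (out : List (String × List (String × List (String × List Int)))) : Decidable (Spec_safe_insert d k1 k2 k3 l out) := by
  unfold Spec_safe_insert
  letI i1 : DecidableEq (List Int) := inferInstance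
  letI i2 : DecidableEq (List (String × List Int)) := inferInstance
  letI i3 : DecidableEq (List (String × List (String × List Int))) := inferInstance
  infer_instance

-- ===== CLAIM (what is proved, stated in full; the proofs are below) =====
def Claim_equal_safe_insert : Prop := ∀ (d : List (String × List (String × List (String × List Int)))) (k1 : String) (k2 : String) (k3 : String) (l : List Int), Dom_safe_insert d k1 k2 k3 l → Spec_safe_insert d k1 k2 k3 l (safe_insert d k1 k2 k3 l)

-- ===== LEMMAS AND PROOFS =====
theorem asetdefault_of_some {β : Type} (d : List (String × β)) (k : String) (v m : β)
    (h : aget d k = some m) : asetdefault d k v = d := by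
  have h' : (PySem.Dict.mk d).get? k = some m := h
  have hc : (PySem.Dict.mk d).contains k = true := by
    rw [PySem.Dict.contains_eq_isSome_get?, h']; rfl
  show ((PySem.Dict.mk d).setdefault k v).items = d
  rw [PySem.Dict.setdefault_of_contains (PySem.Dict.mk d) v hc]
theorem asetdefault_of_none {β : Type} (d : List (String × β)) (k : String) (v : β)
    (h : aget d k = none) : asetdefault d k v = aset d k v := by
  have h' : (PySem.Dict.mk d).get? k = none := h
  have hc : (PySem.Dict.mk d).contains k = false := by
    rw [PySem.Dict.contains_eq_isSome_get?, h']; rfl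
  show ((PySem.Dict.mk d).setdefault k v).items = ((PySem.Dict.mk d).insert k v).items
  rw [PySem.Dict.setdefault_of_not_contains (PySem.Dict.mk d) v hc]

theorem aget_nil {β : Type} (k : String) : aget ([] : List (String × β)) k = none := rfl

theorem aset_aset_self {β : Type} (d : List (String × β)) (k : String) (v w : β) :
    aset (aset d k v) k w = aset d k w := by
  show (((PySem.Dict.mk d).insert k v).insert k w).items = ((PySem.Dict.mk d).insert k w).items
  rw [PySem.Dict.insert_insert_self]

theorem safe_insert_eq_alt (d : List (String × List (String × List (String × List Int)))) (k1 k2 k3 : String) (l : List Int) :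
    safe_insert d k1 k2 k3 l = safe_insert_alt d k1 k2 k3 l := by
  rw [safe_insert]
  split
  · -- aget d k1 = some m1
    rename_i m1 h1
    split
    · -- aget m1 k2 = some m2 : the try body succeeds in A
      rename_i m2 h2
      simp only [safe_insert_alt, asetdefault_of_some d k1 [] m1 h1, h1, Option.getD_some,
        asetdefault_of_some m1 k2 [] m2 h2, h2]
    · -- aget m1 k2 = none : A creates level 2 and retries once
      rename_i h2
      rw [safe_insert]
      split
      · rename_i n1 hn1
        rw [aget_aset_self] at hn1
        cases hn1
        split
        · rename_i n2 hn2
          rw [aget_aset_self] at hn2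
          cases hn2
          simp only [safe_insert_alt, asetdefault_of_some d k1 [] m1 h1, h1, Option.getD_some,
            asetdefault_of_none m1 k2 [] h2, aget_aset_self, aset_aset_self]
        · rename_i hn2
          rw [aget_aset_self] at hn2
          exact absurd hn2 (by simp)
      · rename_i hn1
        rw [aget_aset_self] at hn1
        exact absurd hn1 (by simp)
  · -- aget d k1 = none : A creates level 1, retries, creates level 2, retries again
    rename_i h1
    rw [safe_insert]
    split
    · rename_i n1 hn1
      rw [aget_aset_self] at hn1
      cases hn1
      split
      · rename_i n2 hn2
        rw [aget_nil] at hn2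
        exact absurd hn2 (by simp)
      · rw [safe_insert]
        split
        · rename_i p1 hp1
          rw [aset_aset_self, aget_aset_self] at hp1
          cases hp1
          split
          · rename_i p2 hp2
            rw [aget_aset_self] at hp2
            cases hp2
            simp only [safe_insert_alt, asetdefault_of_none d k1 [] h1, aget_aset_self,
              Option.getD_some,
              asetdefault_of_none ([] : List (String × List (String × List Int))) k2 [] (aget_nil k2),
              aset_aset_self]
          · rename_i hp2
            rw [aget_aset_self] at hp2
            exact absurd hp2 (by simp)
        · rename_i hp1
          rw [aset_aset_self, aget_aset_self] at hp1
          exact absurd hp1 (by simp)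
    · rename_i hn1
      rw [aget_aset_self] at hn1
      exact absurd hn1 (by simp)

-- ===== VERDICT (by name: the statement is the Claim_ definition above) =====
theorem safe_insert_spec : Claim_equal_safe_insert := by
  intro d k1 k2 k3 l _
  exact safe_insert_eq_alt d k1 k2 k3 l
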